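-- pv_equiv track=rewrite | github.com/SpatchKock/crypto_py | libs.py | refillPermutation
-- ===== SOURCE A (Python) =====
-- def refillPermutation(permutation,originalString,origSize, wordLength):
--     perm = []
--     counter = 0
--     #leny = (int(len(originalString)/wordLength))
--     for i in range(len(originalString)):
--         if i % wordLength < origSize:
--             current = permutation[int(counter/origSize)][counter%origSize]
--             perm.append(current)
--             counter+=1
--         else:
--             perm.append(originalString[i])
--
--     return perm
-- ===== SOURCE B (Python) =====
-- def refillPermutation(permutation, originalString, origSize, wordLength):
--     out = []
--     counter = 0
--     n = len(originalString)
--     for start in range(0, n, wordLength):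
--         block = originalString[start:start + wordLength]
--         fill = max(0, min(origSize, len(block)))
--         for _ in range(fill):
--             out.append(permutation[counter // origSize][counter % origSize])
--             counter += 1
--         out.extend(block[fill:])
--     return out
-- ===== Notes on version B (the rewrite author's own statement) =====
-- stated objective: alternative
-- what changed: Replaced the flat per-character loop that tests i % wordLength on every position with a nested traversal over word-blocks: each block is sliced out, its first min(origSize, len(block)) slots are filled from the permutation stream and the remainder is copied wholesale with a slice, so the per-element mod test disappears.
-- outside the precondition, e.g. on refillPermutation([[7, 8]], [5, 6], 2, -2): A returns [7, 8], B returns []; on refillPermutation([], [], 1, 0): A returns [], B raises ValueError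
import Mathlib
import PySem

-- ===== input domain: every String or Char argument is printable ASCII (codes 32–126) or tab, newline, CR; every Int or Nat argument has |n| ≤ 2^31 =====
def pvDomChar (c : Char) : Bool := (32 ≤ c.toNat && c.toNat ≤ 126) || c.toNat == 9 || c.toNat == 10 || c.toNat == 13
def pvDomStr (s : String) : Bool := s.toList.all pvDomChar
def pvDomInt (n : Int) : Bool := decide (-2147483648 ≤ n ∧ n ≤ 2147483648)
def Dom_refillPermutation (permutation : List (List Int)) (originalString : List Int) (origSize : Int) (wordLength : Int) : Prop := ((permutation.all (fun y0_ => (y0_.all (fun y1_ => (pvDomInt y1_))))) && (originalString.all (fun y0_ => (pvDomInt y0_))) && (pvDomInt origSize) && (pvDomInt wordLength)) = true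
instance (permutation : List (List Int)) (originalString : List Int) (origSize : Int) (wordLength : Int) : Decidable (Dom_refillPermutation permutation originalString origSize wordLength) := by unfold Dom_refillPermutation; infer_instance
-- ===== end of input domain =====

-- B rewrites A's flat per-character loop (mod test on every index) as a traversal over
-- word-blocks, filling each block's permutation slots from a running counter and copying
-- the block's tail wholesale; equal return values on Pre_ (A mutates nothing).

-- ===== PORT A =====
-- 'permutation[counter // origSize][counter % origSize]': the identical subexpression of
-- both Python sources.  A writes the row index as int(counter/origSize); counter ≥ 0 and
-- origSize ≥ 1 whenever this line is reached on an input admitted by Pre_, so it equals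
-- floor division exactly there.
def pvLook (permutation : List (List Int)) (origSize : Int) (c : Int) : Int :=
  PySem.List.pyGetD (PySem.List.pyGetD permutation (PySem.Int.floordiv c origSize) [])
    (PySem.Int.mod c origSize) 0

def refillPermutation (permutation : List (List Int)) (originalString : List Int) (origSize : Int) (wordLength : Int) : List Int :=
  ((List.range originalString.length).foldl
    (fun (st : List Int × Int) (i : Nat) =>
      if PySem.Int.mod (i : Int) wordLength < origSize then
        (st.1 ++ [pvLook permutation origSize st.2], st.2 + 1)
      else
        (st.1 ++ [PySem.List.pyGetD originalString (i : Int) 0], st.2))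
    ([], (0 : Int))).1

-- ===== PORT B =====
-- One call = one iteration of Source B's 'for start in range(0, n, wordLength)' with
-- rest = originalString[start:]; block = rest[:wordLength]; fill = max(0, min(origSize,
-- len(block))) is the Nat 'min origSize.toNat block'.  'max 1 block' only totalises the
-- recursion: block ≥ 1 on every reachable call (wn ≥ 1, rest ≠ []).
def pvAltLoop (permutation : List (List Int)) (origSize : Int) (wn : Nat) : List Int → Int → List Int
  | [], _ => []
  | x :: tl, c =>
    let block : Nat := min wn (x :: tl).length
    let fill : Nat := min origSize.toNat block
    ((List.range fill).map (fun (j : Nat) => pvLook permutation origSize (c + (j : Int))))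
      ++ ((x :: tl).take block).drop fill
      ++ pvAltLoop permutation origSize wn ((x :: tl).drop (max 1 block)) (c + (fill : Int))
  termination_by rest _ => rest.length
  decreasing_by simp

-- range(0, n, wordLength) is empty for wordLength < 0 (and for n = 0); for wordLength = 0
-- Python raises ValueError — outside Pre_, where this port's value is not claimed.
def refillPermutation_alt (permutation : List (List Int)) (originalString : List Int) (origSize : Int) (wordLength : Int) : List Int :=
  if wordLength ≤ 0 then [] else pvAltLoop permutation origSize wordLength.toNat originalString 0

-- ===== PRECONDITION & SPEC =====
-- number of loop positions of A that draw from the permutation stream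
def pvFilledCount (originalString : List Int) (origSize : Int) (wordLength : Int) : Nat :=
  ((List.range originalString.length).filter
    (fun i => decide (PySem.Int.mod (i : Int) wordLength < origSize))).length

-- Pre_ excludes wordLength = 0 (A's 'i % wordLength' — and B's range step — raise there,
-- except that A still returns [] on the empty string), permutations too short for the
-- counters A consumes (IndexError in both Pythons), and nonempty strings with negative
-- wordLength, a corner where A's value rests on Python's negative floor-mod while B's
-- range(0, n, wordLength) is empty.
def Pre_refillPermutation (permutation : List (List Int)) (originalString : List Int) (origSize : Int) (wordLength : Int) : Prop :=
  (1 ≤ wordLength ∨ (originalString = [] ∧ wordLength ≠ 0)) ∧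
  (∀ c : Nat, c < pvFilledCount originalString origSize wordLength →
    c / origSize.toNat < permutation.length ∧
    c % origSize.toNat < (permutation.getD (c / origSize.toNat) []).length)

instance (permutation : List (List Int)) (originalString : List Int) (origSize : Int) (wordLength : Int) : Decidable (Pre_refillPermutation permutation originalString origSize wordLength) := by
  unfold Pre_refillPermutation; infer_instance

def pvWitness_refillPermutation : List (List Int) × List Int × Int × Int :=
  ([[10, 11], [12, 13]], [1, 2, 3, 4, 5], 2, 3)

def Spec_refillPermutation (permutation : List (List Int)) (originalString : List Int) (origSize : Int) (wordLength : Int) (out : List Int) : Prop := out = refillPermutation_alt permutation originalString origSize wordLength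
instance (permutation : List (List Int)) (originalString : List Int) (origSize : Int) (wordLength : Int) (out : List Int) : Decidable (Spec_refillPermutation permutation originalString origSize wordLength out) := by unfold Spec_refillPermutation; infer_instance

-- ===== CLAIM (what is proved, stated in full; the proofs are below) =====
def Claim_equal_refillPermutation : Prop := ∀ (permutation : List (List Int)) (originalString : List Int) (origSize : Int) (wordLength : Int), Dom_refillPermutation permutation originalString origSize wordLength → Pre_refillPermutation permutation originalString origSize wordLength → Spec_refillPermutation permutation originalString origSize wordLength (refillPermutation permutation originalString origSize wordLength)

-- ===== LEMMAS AND PROOFS =====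

-- A's loop body, named for the lemmas
def pvStepA (permutation : List (List Int)) (originalString : List Int) (origSize : Int) (wordLength : Int) (st : List Int × Int) (i : Nat) : List Int × Int :=
  if PySem.Int.mod (i : Int) wordLength < origSize then
    (st.1 ++ [pvLook permutation origSize st.2], st.2 + 1)
  else
    (st.1 ++ [PySem.List.pyGetD originalString (i : Int) 0], st.2)

theorem pvA_eq_fold (permutation : List (List Int)) (originalString : List Int) (origSize : Int) (wordLength : Int) :
    refillPermutation permutation originalString origSize wordLength
      = ((List.range originalString.length).foldl (pvStepA permutation originalString origSize wordLength) ([], 0)).1 := by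
  unfold refillPermutation pvStepA
  rfl

theorem pv_cond_bridge (origSize wordLength : Int) (hw : 1 ≤ wordLength) (i : Nat) :
    (PySem.Int.mod (i : Int) wordLength < origSize) ↔ (i % wordLength.toNat < origSize.toNat) := by
  have hwc : ((wordLength.toNat : Nat) : Int) = wordLength := by omega
  conv_lhs => rw [← hwc, PySem.Int.mod_natCast]
  omega

theorem pv_block (permutation : List (List Int)) (s : List Int) (origSize wordLength : Int)
    (hw : 1 ≤ wordLength) :
    ∀ (bl : List Int) (j q : Nat) (c : Int) (acc : List Int),
      j + bl.length ≤ wordLength.toNat →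
      (∀ t (ht : t < bl.length), s[wordLength.toNat * q + j + t]? = some bl[t]) →
      (List.range' (wordLength.toNat * q + j) bl.length).foldl
          (pvStepA permutation s origSize wordLength) (acc, c)
        = (acc ++ (List.range (min origSize.toNat (j + bl.length) - j)).map
              (fun (t : Nat) => pvLook permutation origSize (c + (t : Int)))
              ++ bl.drop (min origSize.toNat (j + bl.length) - j),
           c + ((min origSize.toNat (j + bl.length) - j : Nat) : Int)) := by
  intro bl
  induction bl with
  | nil => intro j q c acc _ _; simp
  | cons x tl ih =>
    intro j q c acc hlen hbl
    have hjlt : j < wordLength.toNat := by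
      simp only [List.length_cons] at hlen; omega
    have hmod : (wordLength.toNat * q + j) % wordLength.toNat = j := by
      rw [Nat.mul_add_mod]; exact Nat.mod_eq_of_lt hjlt
    have hcond : (PySem.Int.mod ((wordLength.toNat * q + j : Nat) : Int) wordLength < origSize)
        ↔ j < origSize.toNat := by
      rw [pv_cond_bridge origSize wordLength hw, hmod]
    simp only [List.length_cons, List.range'_succ, List.foldl_cons]
    have harith : wordLength.toNat * q + j + 1 = wordLength.toNat * q + (j + 1) := by omega
    by_cases hj : j < origSize.toNat
    · have hstep : pvStepA permutation s origSize wordLength (acc, c) (wordLength.toNat * q + j)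
          = (acc ++ [pvLook permutation origSize c], c + 1) := by
        simp only [pvStepA, if_pos (hcond.mpr hj)]
      rw [hstep, harith]
      rw [ih (j + 1) q (c + 1) (acc ++ [pvLook permutation origSize c])
        (by simp only [List.length_cons] at hlen; omega)
        (by intro t ht
            have h0 := hbl (t + 1) (by simp only [List.length_cons]; omega)
            have : wordLength.toNat * q + j + (t + 1) = wordLength.toNat * q + (j + 1) + t := by omega
            rw [this] at h0
            simpa using h0)]
      have hcnt : min origSize.toNat (j + (tl.length + 1)) - j
          = (min origSize.toNat (j + 1 + tl.length) - (j + 1)) + 1 := by omega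
      rw [hcnt]
      generalize (min origSize.toNat (j + 1 + tl.length) - (j + 1)) = k
      rw [Prod.mk.injEq]
      constructor
      · rw [List.range_succ_eq_map]
        simp only [List.map_cons, List.map_map, Nat.cast_zero, add_zero, List.drop_succ_cons,
          List.append_assoc, List.cons_append, List.append_right_inj, List.cons.injEq,
          true_and, List.nil_append, List.append_left_inj]
        apply List.map_congr_left
        intro t _
        simp only [Function.comp_apply]
        congr 1
        push_cast
        ring
      · push_cast; ring
    · have hstep : pvStepA permutation s origSize wordLength (acc, c) (wordLength.toNat * q + j)
          = (acc ++ [PySem.List.pyGetD s ((wordLength.toNat * q + j : Nat) : Int) 0], c) := by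
        simp only [pvStepA, if_neg (fun hh => hj (hcond.mp hh))]
      have hx : PySem.List.pyGetD s ((wordLength.toNat * q + j : Nat) : Int) 0 = x := by
        have h0 := hbl 0 (by simp)
        simp only [Nat.add_zero, List.getElem_cons_zero] at h0
        rw [PySem.List.pyGetD_natCast]
        simp only [List.getD_eq_getElem?_getD, h0, Option.getD_some]
      rw [hstep, hx, harith]
      rw [ih (j + 1) q c (acc ++ [x])
        (by simp only [List.length_cons] at hlen; omega)
        (by intro t ht
            have h0 := hbl (t + 1) (by simp only [List.length_cons]; omega)
            have : wordLength.toNat * q + j + (t + 1) = wordLength.toNat * q + (j + 1) + t := by omega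
            rw [this] at h0
            simpa using h0)]
      have hc1 : min origSize.toNat (j + (tl.length + 1)) - j = 0 := by omega
      have hc2 : min origSize.toNat (j + 1 + tl.length) - (j + 1) = 0 := by omega
      rw [hc1, hc2]
      simp

theorem pv_main (permutation : List (List Int)) (s : List Int) (origSize wordLength : Int)
    (hw : 1 ≤ wordLength) :
    ∀ (m : Nat) (rest : List Int) (q : Nat) (c : Int) (acc : List Int),
      rest.length = m →
      (∀ t (ht : t < rest.length), s[wordLength.toNat * q + t]? = some rest[t]) →
      ((List.range' (wordLength.toNat * q) rest.length).foldl
          (pvStepA permutation s origSize wordLength) (acc, c)).1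
        = acc ++ pvAltLoop permutation origSize wordLength.toNat rest c := by
  intro m
  induction m using Nat.strong_induction_on with
  | _ m ihm =>
    intro rest q c acc hm hbl
    cases rest with
    | nil => simp [pvAltLoop]
    | cons x tl =>
      have hwn : 1 ≤ wordLength.toNat := by omega
      have hlen1 : 1 ≤ (x :: tl).length := by simp
      have hb1 : 1 ≤ min wordLength.toNat (x :: tl).length := le_min hwn hlen1
      have hsplit : List.range' (wordLength.toNat * q) (x :: tl).length
          = List.range' (wordLength.toNat * q) (min wordLength.toNat (x :: tl).length)
            ++ List.range' (wordLength.toNat * q + min wordLength.toNat (x :: tl).length)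
                ((x :: tl).length - min wordLength.toNat (x :: tl).length) := by
        rw [List.range'_append_1]
        congr 1
        omega
      have hblock := pv_block permutation s origSize wordLength hw
        ((x :: tl).take (min wordLength.toNat (x :: tl).length)) 0 q c acc
        (by simp)
        (by intro t ht
            simp only [List.length_take] at ht
            rw [List.getElem_take]
            have : wordLength.toNat * q + 0 + t = wordLength.toNat * q + t := by omega
            rw [this]
            exact hbl t (by omega))
      simp only [Nat.add_zero, Nat.zero_add, Nat.sub_zero, List.length_take] at hblock
      have hmm : min (min wordLength.toNat (x :: tl).length) (x :: tl).length
          = min wordLength.toNat (x :: tl).length := by omega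
      rw [hmm] at hblock
      rw [hsplit, List.foldl_append, hblock]
      by_cases hle : (x :: tl).length ≤ wordLength.toNat
      · have hmin : min wordLength.toNat (x :: tl).length = (x :: tl).length := by omega
        rw [hmin]
        simp only [Nat.sub_self, List.range'_zero, List.foldl_nil]
        conv_rhs => rw [pvAltLoop]
        simp only [hmin, List.take_length, List.append_assoc]
        have hdrop : (x :: tl).drop (max 1 (x :: tl).length) = [] := by
          rw [max_eq_right hlen1, List.drop_length]
        rw [hdrop]
        simp [pvAltLoop]
      · have hmin : min wordLength.toNat (x :: tl).length = wordLength.toNat := by omega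
        rw [hmin] at hblock ⊢
        have harith : wordLength.toNat * q + wordLength.toNat = wordLength.toNat * (q + 1) := by ring
        rw [harith]
        have hdl : (x :: tl).length - wordLength.toNat = ((x :: tl).drop wordLength.toNat).length := by
          simp
        rw [hdl]
        rw [ihm ((x :: tl).drop wordLength.toNat).length
          (by simp only [List.length_drop, List.length_cons] at hm ⊢; omega)
          ((x :: tl).drop wordLength.toNat) (q + 1)
          (c + ((min origSize.toNat wordLength.toNat : Nat) : Int))
          _ rfl
          (by intro t ht
              simp only [List.length_drop] at ht
              rw [List.getElem_drop]
              have : wordLength.toNat * (q + 1) + t = wordLength.toNat * q + (wordLength.toNat + t) := by ring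
              rw [this]
              exact hbl (wordLength.toNat + t) (by omega))]
        conv_rhs => rw [pvAltLoop]
        simp only [hmin, List.append_assoc]
        rw [max_eq_right hwn]

-- ===== VERDICT (by name: the statement is the Claim_ definition above) =====
theorem refillPermutation_spec : Claim_equal_refillPermutation := by
  intro permutation originalString origSize wordLength _hdom hpre
  unfold Spec_refillPermutation
  rcases hpre.1 with hw | ⟨hs, hw0⟩
  · rw [pvA_eq_fold, refillPermutation_alt, if_neg (by omega)]
    have h := pv_main permutation originalString origSize wordLength hw
      originalString.length originalString 0 0 [] rfl
      (by intro t ht; simp)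
    simpa [List.range_eq_range'] using h
  · subst hs
    simp [refillPermutation, refillPermutation_alt]
    intro h
    simp [pvAltLoop]
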